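-- pv_equiv track=rewrite | github.com/nhdandz/textsum2022 | modules/root_kafka/helper_multi.py | get_raw_text_by_topic
-- ===== SOURCE A (Python) =====
-- def removeDuplicates(lst):
--     return list(set([i for i in lst]))
--
-- def get_raw_text_by_topic(topics,raw_text):
--     list_pragrab = raw_text.split('\n')
--     list_raw = []
--     topic_choose = topics[0]
--     topic_not = topics[1]
--     if len(topic_choose) != 0:
--         for key_words in topic_choose:
--             key_word = key_words.split(',')
--             for pragrab in list_pragrab :
--                 is_choose = True
--                 for word in key_word:
--                     if word.lower() not in pragrab.lower():
--                         is_choose = False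
--                 if is_choose == True:
--                     index = list_pragrab.index(pragrab)
--                     list_raw.append((index,pragrab))
--     else:
--         count = 0
--         for pragrab in list_pragrab :
--             list_raw.append((count,pragrab))
--             count +=1
--     list_raw = removeDuplicates(list_raw)
--     list_raw_process = sorted(list_raw, key=lambda tup: tup[0])
--     list_raw_final = []
--     if len(topic_not) != 0:
--         for key_words in topic_not:
--             key_word = key_words.split(',')
--             for pragrab in list_raw_process :
--                 is_choose = True
--                 for word in key_word:
--                     if ' '+word.strip().lower()+' ' in pragrab[1].lower():
--                         is_choose = False
--                 if is_choose == True: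
--                     list_raw_final.append(pragrab)
--     else:
--         list_raw_final = list_raw_process
--     list_raw_final = removeDuplicates(list_raw_final)
--     list_raw_final_process = sorted(list_raw_final, key=lambda tup: tup[0])
--     list_text_topic = []
--     for text_topic in list_raw_final_process:
--         list_text_topic.append(text_topic[1])
--     return '\n'.join(list_text_topic)
-- ===== SOURCE B (Python) =====
-- def get_raw_text_by_topic(topics, raw_text):
--     topic_choose = topics[0]
--     topic_not = topics[1]
--     inc = [[w.lower() for w in g.split(',')] for g in topic_choose]
--     exc = [[' ' + w.strip().lower() + ' ' for w in g.split(',')] for g in topic_not]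
--     out = []
--     seen = set()
--     for p in raw_text.split('\n'):
--         low = p.lower()
--         if inc:
--             if p in seen:
--                 continue
--             seen.add(p)
--             if not any(all(w in low for w in g) for g in inc):
--                 continue
--         if exc and not any(all(w not in low for w in g) for g in exc):
--             continue
--         out.append(p)
--     return '\n'.join(out)
-- ===== Notes on version B (the rewrite author's own statement) =====
-- stated objective: faster
-- what changed: A's four staged passes (nested keyword/paragraph loops with repeated list.index scans, two set-dedup rounds, two sorts, a final projection loop) are replaced by one streaming pass that pre-lowers the keyword groups once and emits each kept paragraph immediately in scan order with a seen-set for the dedup, using the fact that sorting by first occurrence index equals first-occurrence scan order, so no tuples, no index lookups and no sorting are needed.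
import Mathlib
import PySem

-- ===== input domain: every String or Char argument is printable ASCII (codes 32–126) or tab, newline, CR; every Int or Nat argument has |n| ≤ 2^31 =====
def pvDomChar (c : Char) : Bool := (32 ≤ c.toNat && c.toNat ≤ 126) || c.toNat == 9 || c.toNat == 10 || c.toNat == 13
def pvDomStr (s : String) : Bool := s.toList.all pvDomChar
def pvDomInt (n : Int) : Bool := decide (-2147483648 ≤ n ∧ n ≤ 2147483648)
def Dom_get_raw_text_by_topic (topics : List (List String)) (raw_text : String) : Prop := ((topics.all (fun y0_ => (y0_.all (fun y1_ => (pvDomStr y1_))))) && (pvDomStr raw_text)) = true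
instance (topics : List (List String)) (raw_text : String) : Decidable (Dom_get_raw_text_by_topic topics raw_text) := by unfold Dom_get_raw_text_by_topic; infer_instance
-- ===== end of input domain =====

-- B replaces A's staged passes (nested keyword loops + list.index + set dedup + two sorts) by one
-- streaming pass with a seen-set that emits kept paragraphs in scan order; return value only.

-- ===== PORT A =====
-- Python: list(set(lst)); the set's hash order is consumed only through a sort whose keys are
-- unique here, so first-insertion order is exact for the final result.
def removeDuplicates (lst : List (Int × String)) : List (Int × String) :=
  PySem.Set.ofList lst

def get_raw_text_by_topic (topics : List (List String)) (raw_text : String) : String :=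
  let list_pragrab := (PySem.Str.split? raw_text "\n").getD []   -- separator ≠ "" ⇒ split? is some
  let topic_choose := topics.getD 0 []                           -- topics[0]; Pre_ guarantees the index is in range
  let topic_not := topics.getD 1 []                              -- topics[1]
  let list_raw : List (Int × String) :=
    if topic_choose.length ≠ 0 then
      topic_choose.foldl (fun acc key_words =>
        let key_word := (PySem.Str.split? key_words ",").getD []
        list_pragrab.foldl (fun acc2 pragrab =>
          let is_choose := key_word.foldl (fun b word =>
            if ¬ PySem.Str.isIn (PySem.Str.lower word) (PySem.Str.lower pragrab) then false else b) true
          if is_choose then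
            -- list_pragrab.index(pragrab): pragrab ∈ list_pragrab, so index? is some
            acc2 ++ [((((PySem.List.index? list_pragrab pragrab).getD 0 : Nat) : Int), pragrab)]
          else acc2) acc) []
    else
      (list_pragrab.foldl (fun (st : Int × List (Int × String)) pragrab =>
        (st.1 + 1, st.2 ++ [(st.1, pragrab)])) ((0 : Int), ([] : List (Int × String)))).2
  let list_raw' := removeDuplicates list_raw
  let list_raw_process := PySem.List.sorted list_raw' (fun tup => tup.1)
  let list_raw_final : List (Int × String) :=
    if topic_not.length ≠ 0 then
      topic_not.foldl (fun acc key_words =>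
        let key_word := (PySem.Str.split? key_words ",").getD []
        list_raw_process.foldl (fun acc2 pragrab =>
          let is_choose := key_word.foldl (fun b word =>
            if PySem.Str.isIn (" " ++ PySem.Str.lower (PySem.Str.strip word) ++ " ") (PySem.Str.lower pragrab.2) then false else b) true
          if is_choose then acc2 ++ [pragrab] else acc2) acc) []
    else list_raw_process
  let list_raw_final' := removeDuplicates list_raw_final
  let list_raw_final_process := PySem.List.sorted list_raw_final' (fun tup => tup.1)
  let list_text_topic := list_raw_final_process.foldl (fun acc text_topic => acc ++ [text_topic.2]) []
  PySem.Str.join "\n" list_text_topic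

-- ===== PORT B =====
def get_raw_text_by_topic_alt (topics : List (List String)) (raw_text : String) : String :=
  let topic_choose := topics.getD 0 []                           -- topics[0]; Pre_ guarantees the index is in range
  let topic_not := topics.getD 1 []                              -- topics[1]
  let inc := topic_choose.map (fun g => ((PySem.Str.split? g ",").getD []).map PySem.Str.lower)
  let exc := topic_not.map (fun g => ((PySem.Str.split? g ",").getD []).map
      (fun w => " " ++ PySem.Str.lower (PySem.Str.strip w) ++ " "))
  let st := ((PySem.Str.split? raw_text "\n").getD []).foldl
    (fun (st : List String × PySem.Set String) p =>
      let low := PySem.Str.lower p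
      if inc ≠ [] then
        if PySem.Set.contains st.2 p then st                     -- 'continue'
        else
          let seen := PySem.Set.add st.2 p
          if ¬ (inc.any fun g => g.all fun w => PySem.Str.isIn w low) then (st.1, seen)
          else if exc ≠ [] ∧ ¬ (exc.any fun g => g.all fun w => ! PySem.Str.isIn w low) then (st.1, seen)
          else (st.1 ++ [p], seen)
      else
        if exc ≠ [] ∧ ¬ (exc.any fun g => g.all fun w => ! PySem.Str.isIn w low) then st
        else (st.1 ++ [p], st.2))
    ([], PySem.Set.empty)
  PySem.Str.join "\n" st.1

-- ===== PRECONDITION & SPEC =====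
-- Python A evaluates topics[0] and topics[1]: on fewer than two topic lists it raises IndexError
-- (and so does B), so exactly those inputs are excluded.
def Pre_get_raw_text_by_topic (topics : List (List String)) (raw_text : String) : Prop :=
  2 ≤ topics.length
instance (topics : List (List String)) (raw_text : String) : Decidable (Pre_get_raw_text_by_topic topics raw_text) := by unfold Pre_get_raw_text_by_topic; infer_instance

def pvWitness_get_raw_text_by_topic : List (List String) × String :=
  ([["cat"], ["dog"]], "the cat sat\nthe dog ran\ncat and dog")

def Spec_get_raw_text_by_topic (topics : List (List String)) (raw_text : String) (out : String) : Prop := out = get_raw_text_by_topic_alt topics raw_text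
instance (topics : List (List String)) (raw_text : String) (out : String) : Decidable (Spec_get_raw_text_by_topic topics raw_text out) := by unfold Spec_get_raw_text_by_topic; infer_instance

-- ===== CLAIM (what is proved, stated in full; the proofs are below) =====
def Claim_equal_get_raw_text_by_topic : Prop := ∀ (topics : List (List String)) (raw_text : String), Dom_get_raw_text_by_topic topics raw_text → Pre_get_raw_text_by_topic topics raw_text → Spec_get_raw_text_by_topic topics raw_text (get_raw_text_by_topic topics raw_text)

-- ===== LEMMAS AND PROOFS =====

-- the include-match and exclude-keep predicates, and the first-occurrence index
def incMatch (tc : List String) (p : String) : Bool :=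
  tc.any (fun g => ((PySem.Str.split? g ",").getD []).all
    (fun w => PySem.Str.isIn (PySem.Str.lower w) (PySem.Str.lower p)))

def excKeep (tn : List String) (p : String) : Bool :=
  tn.any (fun g => ((PySem.Str.split? g ",").getD []).all
    (fun w => ! PySem.Str.isIn (" " ++ PySem.Str.lower (PySem.Str.strip w) ++ " ") (PySem.Str.lower p)))

def ifx (l : List String) (p : String) : Nat := (PySem.List.index? l p).getD 0

-- the canonical middle form both ports are reduced to
def canon (paras tc tn : List String) : String :=
  let S1 : List (Int × String) :=
    if tc ≠ [] then
      PySem.Set.ofList ((paras.filter (incMatch tc)).map (fun p => ((ifx paras p : Int), p)))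
    else PySem.Set.ofList (PySem.List.enumerate paras 0)
  let S2 : List (Int × String) :=
    if tn ≠ [] then PySem.Set.ofList (S1.filter (fun t => excKeep tn t.2)) else S1
  PySem.Str.join "\n" ((PySem.List.sorted S2 (fun t => t.1)).map (fun t => t.2))

-- Python's all-words check written as A writes it: a fold that keeps ANDing.
theorem foldl_and_eq {α : Type} (q : α → Bool) (l : List α) (b : Bool) :
    l.foldl (fun b w => q w && b) b = (b && l.all q) := by
  induction l generalizing b with
  | nil => simp
  | cons h t ih => simp only [List.foldl_cons, ih, List.all_cons]; cases q h <;> cases b <;> simp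

theorem foldl_if_not_eq_and_all {α : Type} (q : α → Bool) (l : List α) (b : Bool) :
    l.foldl (fun b w => if ¬ q w then false else b) b = (b && l.all q) := by
  have hf : (fun (b : Bool) (w : α) => if ¬ q w then false else b) = (fun b w => q w && b) := by
    funext b w; cases q w <;> simp
  rw [hf, foldl_and_eq]

theorem foldl_if_eq_and_all_not {α : Type} (r : α → Bool) (l : List α) (b : Bool) :
    l.foldl (fun b w => if r w then false else b) b = (b && l.all (fun w => ! r w)) := by
  have hf : (fun (b : Bool) (w : α) => if r w then false else b) = (fun b w => (! r w) && b) := by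
    funext b w; cases r w <;> simp
  rw [hf, foldl_and_eq]

-- A's counting loop in the empty-topic_choose branch is enumerate.
theorem countFold (l : List String) (c : Int) (acc : List (Int × String)) :
    l.foldl (fun (st : Int × List (Int × String)) p => (st.1 + 1, st.2 ++ [(st.1, p)])) (c, acc)
      = (c + l.length, acc ++ PySem.List.enumerate l c) := by
  induction l generalizing c acc with
  | nil => simp
  | cons h t ih =>
      simp [PySem.List.enumerate_cons, ih]
      omega

-- key-injectivity: every element of the list is (k, paras[k]) for some k, so the key determines it.
def KeyInj (l : List (Int × String)) : Prop :=
  ∀ a ∈ l, ∀ b ∈ l, a.1 = b.1 → a = b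

theorem keyInj_of_shape (paras : List String) (s : Int) (l : List (Int × String))
    (h : ∀ x ∈ l, ∃ k : Nat, ∃ hk : k < paras.length, x = ((s + k : Int), paras[k])) :
    KeyInj l := by
  intro a ha b hb hab
  rcases h a ha with ⟨k1, hk1, rfl⟩
  rcases h b hb with ⟨k2, hk2, rfl⟩
  simp only at hab
  have : k1 = k2 := by omega
  subst this; rfl

-- two Nodup lists with the same members and key-injective keys sort (by key) to the same list.
theorem sorted_eq_of_mem_nodup (l1 l2 : List (Int × String))
    (hm : ∀ x, x ∈ l1 ↔ x ∈ l2) (h1 : l1.Nodup) (h2 : l2.Nodup) (hinj : KeyInj l1) :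
    PySem.List.sorted l1 (fun t => t.1) = PySem.List.sorted l2 (fun t => t.1) := by
  have perm1 : (PySem.List.sorted l1 (fun t => t.1)).Perm l1 := PySem.List.sorted_perm _ _ _
  have hle := PySem.List.sorted_pairwise l1 (fun t => t.1)
  have hnd : (PySem.List.sorted l1 (fun t => t.1)).Nodup := perm1.symm.nodup h1
  have hlt : List.Pairwise (fun a b : Int × String => a.1 < b.1)
      (PySem.List.sorted l1 (fun t => t.1)) := by
    refine List.Pairwise.imp_of_mem ?_ (hle.and hnd)
    intro a b ha hb hab
    exact lt_of_le_of_ne hab.1 (fun hEq =>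
      hab.2 (hinj a (perm1.subset ha) b (perm1.subset hb) hEq))
  have perm2 : (PySem.List.sorted l1 (fun t => t.1)).Perm l2 :=
    perm1.trans ((List.perm_ext_iff_of_nodup h1 h2).mpr hm)
  exact (PySem.List.sorted_eq_of_perm_of_pairwise_lt l2 _ _ perm2 hlt).symm

theorem shape_of_index (paras : List String) (p : String) (hp : p ∈ paras) :
    ∃ k : Nat, ∃ _ : k < paras.length,
      (((((PySem.List.index? paras p).getD 0 : Nat)) : Int), p) = ((0 + (k : Int)), paras[k]) := by
  obtain ⟨k, hk⟩ := Option.isSome_iff_exists.mp ((PySem.List.index?_isSome_iff paras p).mpr hp)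
  obtain ⟨hklt, hpk, -⟩ := PySem.List.getElem_of_index?_eq_some hk
  exact ⟨k, hklt, by rw [hk, hpk]; simp⟩

-- the exclude stage + final join, for any two equal-membership Nodup stage-1 results.
theorem stage2 (tn : List String) (paras : List String) (keep : String → (Int × String) → Bool)
    (S T : List (Int × String))
    (hmem : ∀ x, x ∈ S ↔ x ∈ T) (hS : S.Nodup) (hT : T.Nodup)
    (hshape : ∀ x ∈ S, ∃ k : Nat, ∃ _ : k < paras.length, x = ((0 + (k : Int)), paras[k])) :
    PySem.Str.join "\n"
      ((PySem.List.sorted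
          (PySem.Set.ofList
            (if tn.length ≠ 0 then
              tn.flatMap (fun g => (PySem.List.sorted S (fun t => t.1)).filter (keep g))
            else PySem.List.sorted S (fun t => t.1)))
          (fun t => t.1)).map (fun t => t.2))
    = PySem.Str.join "\n"
      ((PySem.List.sorted
          (if tn ≠ [] then PySem.Set.ofList (T.filter (fun t => tn.any (fun g => keep g t))) else T)
          (fun t => t.1)).map (fun t => t.2)) := by
  have hinjS : KeyInj S := keyInj_of_shape paras 0 S (by
    intro x hx; obtain ⟨k, hk, hxe⟩ := hshape x hx; exact ⟨k, hk, hxe⟩)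
  have hsort : PySem.List.sorted S (fun t => t.1) = PySem.List.sorted T (fun t => t.1) :=
    sorted_eq_of_mem_nodup S T hmem hS hT hinjS
  have hmemS : ∀ x, x ∈ PySem.List.sorted S (fun t : Int × String => t.1) ↔ x ∈ S :=
    fun x => PySem.List.mem_sorted S _ false x
  by_cases htn : tn = []
  · subst htn
    simp only [List.length_nil, ne_eq, not_true_eq_false, if_neg, not_false_iff]
    have hnds : (PySem.List.sorted S (fun t : Int × String => t.1)).Nodup :=
      ((PySem.List.sorted_perm S (fun t => t.1) false).symm).nodup hS
    rw [PySem.Set.ofList_eq_self_of_nodup _ hnds, PySem.List.sorted_sorted, hsort]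
  · rw [if_pos (by simpa [List.length_eq_zero_iff] using htn), if_pos htn]
    have hs : PySem.List.sorted
        (PySem.Set.ofList (tn.flatMap (fun g => (PySem.List.sorted S (fun t => t.1)).filter (keep g))))
        (fun t : Int × String => t.1)
      = PySem.List.sorted (PySem.Set.ofList (T.filter (fun t => tn.any (fun g => keep g t))))
        (fun t : Int × String => t.1) := by
      apply sorted_eq_of_mem_nodup
      · intro x
        simp only [PySem.Set.mem_ofList, List.mem_flatMap, List.mem_filter, List.any_eq_true,
          hmemS, hmem]
        constructor
        · rintro ⟨g, hg, hx, hk⟩; exact ⟨hx, g, hg, hk⟩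
        · rintro ⟨hx, g, hg, hk⟩; exact ⟨g, hg, hx, hk⟩
      · exact PySem.Set.nodup_ofList _
      · exact PySem.Set.nodup_ofList _
      · intro a ha b hb hab
        have haS : a ∈ S := by
          simp only [PySem.Set.mem_ofList, List.mem_flatMap, List.mem_filter, hmemS] at ha
          obtain ⟨g, -, hx, -⟩ := ha; exact hx
        have hbS : b ∈ S := by
          simp only [PySem.Set.mem_ofList, List.mem_flatMap, List.mem_filter, hmemS] at hb
          obtain ⟨g, -, hx, -⟩ := hb; exact hx
        exact hinjS a haS b hbS hab
    rw [hs]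

-- A's port equals the canonical form.
theorem a_eq_canon (paras tc tn : List String) :
    PySem.Str.join "\n"
      ((PySem.List.sorted
          (removeDuplicates
            (if tn.length ≠ 0 then
              tn.foldl (fun acc key_words =>
                (PySem.List.sorted (removeDuplicates
                  (if tc.length ≠ 0 then
                    tc.foldl (fun acc key_words =>
                      paras.foldl (fun acc2 pragrab =>
                        if ((PySem.Str.split? key_words ",").getD []).foldl (fun b word =>
                            if ¬ PySem.Str.isIn (PySem.Str.lower word) (PySem.Str.lower pragrab) then false else b) true then
                          acc2 ++ [((((PySem.List.index? paras pragrab).getD 0 : Nat) : Int), pragrab)]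
                        else acc2) acc) []
                  else
                    (paras.foldl (fun (st : Int × List (Int × String)) pragrab =>
                      (st.1 + 1, st.2 ++ [(st.1, pragrab)])) ((0 : Int), ([] : List (Int × String)))).2))
                  (fun tup => tup.1)).foldl (fun acc2 pragrab =>
                  if ((PySem.Str.split? key_words ",").getD []).foldl (fun b word =>
                      if PySem.Str.isIn (" " ++ PySem.Str.lower (PySem.Str.strip word) ++ " ") (PySem.Str.lower pragrab.2) then false else b) true then
                    acc2 ++ [pragrab]
                  else acc2) acc) []
            else
              PySem.List.sorted (removeDuplicates
                (if tc.length ≠ 0 then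
                  tc.foldl (fun acc key_words =>
                    paras.foldl (fun acc2 pragrab =>
                      if ((PySem.Str.split? key_words ",").getD []).foldl (fun b word =>
                          if ¬ PySem.Str.isIn (PySem.Str.lower word) (PySem.Str.lower pragrab) then false else b) true then
                        acc2 ++ [((((PySem.List.index? paras pragrab).getD 0 : Nat) : Int), pragrab)]
                      else acc2) acc) []
                else
                  (paras.foldl (fun (st : Int × List (Int × String)) pragrab =>
                    (st.1 + 1, st.2 ++ [(st.1, pragrab)])) ((0 : Int), ([] : List (Int × String)))).2))
                (fun tup => tup.1)))
          (fun tup => tup.1)).foldl (fun acc text_topic => acc ++ [text_topic.2]) [])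
    = canon paras tc tn := by
  unfold canon incMatch excKeep ifx
  simp only [removeDuplicates, foldl_if_not_eq_and_all, foldl_if_eq_and_all_not, Bool.true_and,
    PySem.List.foldl_append_if, PySem.List.foldl_append_singleton_eq_map,
    PySem.List.foldl_append_eq_flatMap, List.nil_append, List.map_id']
  by_cases htc : tc = []
  · subst htc
    simp only [List.length_nil, ne_eq, not_true_eq_false, if_neg, not_false_iff]
    have hcnt : (paras.foldl (fun (st : Int × List (Int × String)) pragrab =>
        (st.1 + 1, st.2 ++ [(st.1, pragrab)])) ((0 : Int), ([] : List (Int × String)))).2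
        = PySem.List.enumerate paras 0 := by
      rw [countFold]; simp
    rw [hcnt]
    exact stage2 tn paras
      (fun g t => ((PySem.Str.split? g ",").getD []).all
        (fun w => ! PySem.Str.isIn (" " ++ PySem.Str.lower (PySem.Str.strip w) ++ " ") (PySem.Str.lower t.2)))
      (PySem.Set.ofList (PySem.List.enumerate paras 0))
      (PySem.Set.ofList (PySem.List.enumerate paras 0))
      (fun x => Iff.rfl) (PySem.Set.nodup_ofList _) (PySem.Set.nodup_ofList _)
      (by
        intro x hx
        rw [PySem.Set.mem_ofList] at hx
        obtain ⟨k, hk, rfl⟩ := (PySem.List.mem_enumerate_iff paras 0 x).mp hx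
        exact ⟨k, hk, rfl⟩)
  · have hlen : tc.length ≠ 0 := by simpa [List.length_eq_zero_iff] using htc
    rw [if_pos hlen, if_pos htc]
    refine stage2 tn paras
      (fun g t => ((PySem.Str.split? g ",").getD []).all
        (fun w => ! PySem.Str.isIn (" " ++ PySem.Str.lower (PySem.Str.strip w) ++ " ") (PySem.Str.lower t.2)))
      (PySem.Set.ofList (tc.flatMap (fun g =>
        (paras.filter (fun p => ((PySem.Str.split? g ",").getD []).all
          (fun w => PySem.Str.isIn (PySem.Str.lower w) (PySem.Str.lower p)))).map
          (fun p => ((((PySem.List.index? paras p).getD 0 : Nat) : Int), p)))))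
      (PySem.Set.ofList ((paras.filter (fun p =>
        tc.any (fun g => ((PySem.Str.split? g ",").getD []).all
          (fun w => PySem.Str.isIn (PySem.Str.lower w) (PySem.Str.lower p))))).map
        (fun p => ((((PySem.List.index? paras p).getD 0 : Nat) : Int), p))))
      ?_ (PySem.Set.nodup_ofList _) (PySem.Set.nodup_ofList _) ?_
    · intro x
      simp only [PySem.Set.mem_ofList, List.mem_flatMap, List.mem_map, List.mem_filter,
        List.any_eq_true]
      constructor
      · rintro ⟨g, hg, p, ⟨hp, hm⟩, rfl⟩
        exact ⟨p, ⟨hp, ⟨g, hg, hm⟩⟩, rfl⟩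
      · rintro ⟨p, ⟨hp, ⟨g, hg, hm⟩⟩, rfl⟩
        exact ⟨g, hg, p, ⟨hp, hm⟩, rfl⟩
    · intro x hx
      simp only [PySem.Set.mem_ofList, List.mem_flatMap, List.mem_map, List.mem_filter] at hx
      obtain ⟨g, -, p, ⟨hp, -⟩, rfl⟩ := hx
      exact shape_of_index paras p hp

-- ---- B-side lemmas ----

-- streaming dedup ("seen" set): emits first occurrences not already in s, in order
def dedupAvoid : List String → PySem.Set String → List String
  | [], _ => []
  | p :: t, s =>
      if PySem.Set.contains s p then dedupAvoid t s
      else p :: dedupAvoid t (PySem.Set.add s p)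

theorem dedupAvoid_eq (l : List String) (s : PySem.Set String) :
    dedupAvoid l s = (PySem.Set.ofList l).filter (fun y => ! PySem.Set.contains s y) := by
  induction l generalizing s with
  | nil => simp [dedupAvoid, PySem.Set.ofList]
  | cons p t ih =>
      have h1 : PySem.Set.update s (p :: t)
          = s ++ ((PySem.Set.ofList (p :: t)).filter (fun y => ! PySem.Set.contains s y)) :=
        PySem.Set.update_eq_append_filter s (p :: t)
      have h2 : PySem.Set.update s (p :: t) = PySem.Set.update (PySem.Set.add s p) t :=
        PySem.Set.update_cons s p t
      by_cases hc : PySem.Set.contains s p = true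
      · have hadd : PySem.Set.add s p = s := by unfold PySem.Set.add; rw [if_pos hc]
        have h3 : PySem.Set.update s t
            = s ++ (PySem.Set.ofList t).filter (fun y => ! PySem.Set.contains s y) :=
          PySem.Set.update_eq_append_filter s t
        have hf : (PySem.Set.ofList (p :: t)).filter (fun y => ! PySem.Set.contains s y)
            = (PySem.Set.ofList t).filter (fun y => ! PySem.Set.contains s y) :=
          List.append_cancel_left (h1.symm.trans (h2.trans (by rw [hadd, h3])))
        show (if PySem.Set.contains s p = true then dedupAvoid t s
          else p :: dedupAvoid t (PySem.Set.add s p)) = _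
        rw [if_pos hc, ih, hf]
      · have hadd : PySem.Set.add s p = s ++ [p] := by unfold PySem.Set.add; rw [if_neg hc]
        have h3 : PySem.Set.update (PySem.Set.add s p) t
            = PySem.Set.add s p
              ++ (PySem.Set.ofList t).filter (fun y => ! PySem.Set.contains (PySem.Set.add s p) y) :=
          PySem.Set.update_eq_append_filter _ t
        have hf : (PySem.Set.ofList (p :: t)).filter (fun y => ! PySem.Set.contains s y)
            = p :: (PySem.Set.ofList t).filter (fun y => ! PySem.Set.contains (PySem.Set.add s p) y) := by
          apply List.append_cancel_left (as := s)
          rw [← h1, h2, h3, hadd]; simp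
        show (if PySem.Set.contains s p = true then dedupAvoid t s
          else p :: dedupAvoid t (PySem.Set.add s p)) = _
        rw [if_neg hc, ih, hf]

theorem ifx_cons_of_mem_ne (p y : String) (t : List String) (hy : y ∈ t) (hne : y ≠ p) :
    ifx (p :: t) y = ifx t y + 1 := by
  obtain ⟨k, hk⟩ := Option.isSome_iff_exists.mp ((PySem.List.index?_isSome_iff t y).mpr hy)
  unfold ifx
  rw [PySem.List.index?_cons_of_ne t (Ne.symm hne), hk]
  simp

-- set(paras) lists paragraphs in strictly increasing order of first-occurrence index
theorem pairwise_ifx (l : List String) :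
    (PySem.Set.ofList l).Pairwise (fun a b => ifx l a < ifx l b) := by
  induction l with
  | nil => simp [PySem.Set.ofList]
  | cons p t ih =>
      rw [PySem.Set.ofList_cons]
      constructor
      · intro y hy
        obtain ⟨hyt', hyne⟩ := (PySem.Set.mem_discard _ _ _).mp hy
        have hyt : y ∈ t := (PySem.Set.mem_ofList _ _).mp hyt'
        have hp0 : ifx (p :: t) p = 0 := by
          unfold ifx; rw [PySem.List.index?_cons_self]; rfl
        rw [hp0, ifx_cons_of_mem_ne p y t hyt hyne]
        omega
      · have hpw : List.Pairwise (fun a b => ifx t a < ifx t b)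
            (PySem.Set.discard (PySem.Set.ofList t) p) := List.Pairwise.filter _ ih
        refine List.Pairwise.imp_of_mem ?_ hpw
        intro a b ha hb hab
        obtain ⟨hat', hane⟩ := (PySem.Set.mem_discard _ _ _).mp ha
        obtain ⟨hbt', hbne⟩ := (PySem.Set.mem_discard _ _ _).mp hb
        rw [ifx_cons_of_mem_ne p a t ((PySem.Set.mem_ofList _ _).mp hat') hane,
          ifx_cons_of_mem_ne p b t ((PySem.Set.mem_ofList _ _).mp hbt') hbne]
        omega

-- the streaming fold in the include branch, for a pointwise keep test k
theorem fold_inc (k : String → Bool) (l : List String) (acc : List String) (s : PySem.Set String) :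
    l.foldl (fun (st : List String × PySem.Set String) p =>
        if PySem.Set.contains st.2 p then st
        else if k p then (st.1 ++ [p], PySem.Set.add st.2 p) else (st.1, PySem.Set.add st.2 p))
      (acc, s)
      = (acc ++ (dedupAvoid l s).filter k, PySem.Set.update s l) := by
  induction l generalizing acc s with
  | nil => simp [dedupAvoid, PySem.Set.update]
  | cons p t ih =>
      rw [PySem.Set.update_cons]
      by_cases hc : PySem.Set.contains s p = true
      · have hadd : PySem.Set.add s p = s := by unfold PySem.Set.add; rw [if_pos hc]
        have hda : dedupAvoid (p :: t) s = dedupAvoid t s := by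
          show (if PySem.Set.contains s p = true then dedupAvoid t s
            else p :: dedupAvoid t (PySem.Set.add s p)) = _
          rw [if_pos hc]
        simp only [List.foldl_cons, hc, if_true, ih, hadd, hda]
      · have hda : dedupAvoid (p :: t) s = p :: dedupAvoid t (PySem.Set.add s p) := by
          show (if PySem.Set.contains s p = true then dedupAvoid t s
            else p :: dedupAvoid t (PySem.Set.add s p)) = _
          rw [if_neg hc]
        by_cases hk : k p = true
        · simp only [List.foldl_cons, hc, if_false, hk, if_true, Bool.false_eq_true,
            ih, hda, List.filter_cons, List.append_assoc, List.singleton_append]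
        · simp only [List.foldl_cons, hc, if_false, hk, Bool.false_eq_true,
            ih, hda, List.filter_cons]

-- the streaming fold in the no-include branch, for a pointwise keep test k
theorem fold_noinc (k : String → Bool) (l : List String) (acc : List String) (s : PySem.Set String) :
    l.foldl (fun (st : List String × PySem.Set String) p =>
        if k p then (st.1 ++ [p], st.2) else st) (acc, s)
      = (acc ++ l.filter k, s) := by
  induction l generalizing acc with
  | nil => simp
  | cons p t ih =>
      by_cases hk : k p = true <;>
        simp [hk, ih]

-- sorting A's stage-2 set by first-occurrence index gives B's scan order
theorem sorted_S2 (paras : List String) (S2 : List (Int × String)) (q : String → Bool)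
    (hmem : ∀ x, x ∈ S2 ↔ ∃ p, (p ∈ paras ∧ q p = true) ∧ x = ((ifx paras p : Int), p))
    (hnd : S2.Nodup) :
    PySem.List.sorted S2 (fun t => t.1)
      = ((PySem.Set.ofList paras).filter q).map (fun p => ((ifx paras p : Int), p)) := by
  have hinj : Function.Injective (fun p : String => ((ifx paras p : Int), p)) := by
    intro a b h; exact congrArg Prod.snd h
  apply PySem.List.sorted_eq_of_perm_of_pairwise_lt
  · refine (List.perm_ext_iff_of_nodup ?_ hnd).mpr ?_
    · exact (List.Nodup.filter q (PySem.Set.nodup_ofList paras)).map hinj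
    · intro x
      rw [hmem x]
      simp only [List.mem_map, List.mem_filter, PySem.Set.mem_ofList]
      constructor
      · rintro ⟨p, ⟨hp, hq⟩, rfl⟩; exact ⟨p, ⟨hp, hq⟩, rfl⟩
      · rintro ⟨p, ⟨hp, hq⟩, rfl⟩; exact ⟨p, ⟨hp, hq⟩, rfl⟩
  · rw [List.pairwise_map]
    have hpw : ((PySem.Set.ofList paras).filter q).Pairwise
        (fun a b => ifx paras a < ifx paras b) := List.Pairwise.filter _ (pairwise_ifx paras)
    refine hpw.imp ?_
    intro a b h
    show ((ifx paras a : Int)) < ((ifx paras b : Int))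
    exact_mod_cast h

-- keys of enumerate are distinct, and its sort is itself
theorem nodup_enumerate (l : List String) (s : Int) : (PySem.List.enumerate l s).Nodup := by
  have := PySem.List.pairwise_lt_enumerate l s
  exact this.imp (fun h heq => by rw [heq] at h; exact lt_irrefl _ h)

theorem sorted_filter_enumerate (l : List String) (q : (Int × String) → Bool) :
    PySem.List.sorted ((PySem.List.enumerate l 0).filter q) (fun t => t.1)
      = (PySem.List.enumerate l 0).filter q := by
  apply PySem.List.sorted_eq_of_perm_of_pairwise_lt
  · exact List.Perm.refl _
  · exact List.Pairwise.filter _ (PySem.List.pairwise_lt_enumerate l 0)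

theorem map_snd_filter_enumerate (l : List String) (s : Int) (q : String → Bool) :
    ((PySem.List.enumerate l s).filter (fun t => q t.2)).map (fun t => t.2) = l.filter q := by
  induction l generalizing s with
  | nil => simp [PySem.List.enumerate]
  | cons p t ih =>
      rw [PySem.List.enumerate_cons]
      by_cases hq : q p = true <;> simp [hq, ih]

-- B's port equals the canonical form.
theorem b_eq_canon (paras tc tn : List String) :
    PySem.Str.join "\n"
      (paras.foldl
        (fun (st : List String × PySem.Set String) p =>
          let low := PySem.Str.lower p
          if tc.map (fun g => ((PySem.Str.split? g ",").getD []).map PySem.Str.lower) ≠ [] then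
            if PySem.Set.contains st.2 p then st
            else
              let seen := PySem.Set.add st.2 p
              if ¬ ((tc.map (fun g => ((PySem.Str.split? g ",").getD []).map PySem.Str.lower)).any
                    fun g => g.all fun w => PySem.Str.isIn w low) then (st.1, seen)
              else if (tn.map (fun g => ((PySem.Str.split? g ",").getD []).map
                        (fun w => " " ++ PySem.Str.lower (PySem.Str.strip w) ++ " "))) ≠ []
                  ∧ ¬ ((tn.map (fun g => ((PySem.Str.split? g ",").getD []).map
                        (fun w => " " ++ PySem.Str.lower (PySem.Str.strip w) ++ " "))).any
                      fun g => g.all fun w => ! PySem.Str.isIn w low) then (st.1, seen)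
              else (st.1 ++ [p], seen)
          else
            if (tn.map (fun g => ((PySem.Str.split? g ",").getD []).map
                  (fun w => " " ++ PySem.Str.lower (PySem.Str.strip w) ++ " "))) ≠ []
                ∧ ¬ ((tn.map (fun g => ((PySem.Str.split? g ",").getD []).map
                      (fun w => " " ++ PySem.Str.lower (PySem.Str.strip w) ++ " "))).any
                    fun g => g.all fun w => ! PySem.Str.isIn w low) then st
            else (st.1 ++ [p], st.2))
        ([], PySem.Set.empty)).1
    = canon paras tc tn := by
  have hany_inc : ∀ p : String,
      ((tc.map (fun g => ((PySem.Str.split? g ",").getD []).map PySem.Str.lower)).any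
        fun g => g.all fun w => PySem.Str.isIn w (PySem.Str.lower p)) = incMatch tc p := by
    intro p; simp [incMatch, List.any_map, List.all_map, Function.comp_def]
  have hany_exc : ∀ p : String,
      ((tn.map (fun g => ((PySem.Str.split? g ",").getD []).map
          (fun w => " " ++ PySem.Str.lower (PySem.Str.strip w) ++ " "))).any
        fun g => g.all fun w => ! PySem.Str.isIn w (PySem.Str.lower p)) = excKeep tn p := by
    intro p; simp [excKeep, List.any_map, List.all_map, Function.comp_def]
  by_cases htc : tc = []
  · -- no include keywords: keep every paragraph (duplicates included) passing the exclude test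
    subst htc
    simp only [List.map_nil, ne_eq, not_true_eq_false, if_false]
    by_cases htn : tn = []
    · subst htn
      simp only [List.map_nil, not_true_eq_false, false_and, if_false]
      have := fold_noinc (fun _ => true) paras [] PySem.Set.empty
      simp only [if_true] at this
      rw [this]
      simp only [List.filter_true, List.nil_append]
      unfold canon
      simp only [ne_eq, not_true_eq_false, if_false]
      rw [PySem.Set.ofList_eq_self_of_nodup _ (nodup_enumerate paras 0)]
      have hs : PySem.List.sorted (PySem.List.enumerate paras 0) (fun t : Int × String => t.1)
          = PySem.List.enumerate paras 0 :=
        PySem.List.sorted_eq_of_perm_of_pairwise_lt _ _ _ (List.Perm.refl _)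
          (PySem.List.pairwise_lt_enumerate paras 0)
      rw [hs, PySem.List.map_snd_enumerate]
    · have htnm : tn.map (fun g => ((PySem.Str.split? g ",").getD []).map
          (fun w => " " ++ PySem.Str.lower (PySem.Str.strip w) ++ " ")) ≠ [] := by
        simpa [List.map_eq_nil_iff] using htn
      have hstep : (fun (st : List String × PySem.Set String) p =>
          if (tn.map (fun g => ((PySem.Str.split? g ",").getD []).map
                (fun w => " " ++ PySem.Str.lower (PySem.Str.strip w) ++ " "))) ≠ []
              ∧ ¬ ((tn.map (fun g => ((PySem.Str.split? g ",").getD []).map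
                    (fun w => " " ++ PySem.Str.lower (PySem.Str.strip w) ++ " "))).any
                  fun g => g.all fun w => ! PySem.Str.isIn w (PySem.Str.lower p)) then st
          else (st.1 ++ [p], st.2))
          = (fun (st : List String × PySem.Set String) p =>
              if excKeep tn p then (st.1 ++ [p], st.2) else st) := by
        funext st p
        by_cases he : ((tn.map (fun g => ((PySem.Str.split? g ",").getD []).map
              (fun w => " " ++ PySem.Str.lower (PySem.Str.strip w) ++ " "))).any
            fun g => g.all fun w => ! PySem.Str.isIn w (PySem.Str.lower p)) = true
        · have hek : excKeep tn p = true := by rw [← hany_exc p]; exact he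
          rw [if_neg (fun h => h.2 he), if_pos hek]
        · have hek : excKeep tn p = false := by
            rw [← hany_exc p]; exact eq_false_of_ne_true he
          rw [if_pos ⟨htnm, he⟩, if_neg (by rw [hek]; exact Bool.false_ne_true)]
      rw [hstep, fold_noinc]
      simp only [List.nil_append]
      unfold canon
      simp only [ne_eq, not_true_eq_false, if_false, htn, not_false_iff, if_true]
      rw [PySem.Set.ofList_eq_self_of_nodup _ (nodup_enumerate paras 0)]
      rw [PySem.Set.ofList_eq_self_of_nodup _
        (List.Nodup.filter _ (nodup_enumerate paras 0))]
      rw [sorted_filter_enumerate, map_snd_filter_enumerate]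
  · -- include keywords: one streaming pass over set(paras) in first-occurrence order
    have htcm : tc.map (fun g => ((PySem.Str.split? g ",").getD []).map PySem.Str.lower) ≠ [] := by
      simpa [List.map_eq_nil_iff] using htc
    simp only [ne_eq, htcm, not_false_iff, if_true]
    set k : String → Bool := fun p => incMatch tc p && (if tn = [] then true else excKeep tn p)
      with hk
    have hstep : (fun (st : List String × PySem.Set String) p =>
        if PySem.Set.contains st.2 p then st
        else
          if ¬ ((tc.map (fun g => ((PySem.Str.split? g ",").getD []).map PySem.Str.lower)).any
                fun g => g.all fun w => PySem.Str.isIn w (PySem.Str.lower p)) then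
            (st.1, PySem.Set.add st.2 p)
          else if (tn.map (fun g => ((PySem.Str.split? g ",").getD []).map
                    (fun w => " " ++ PySem.Str.lower (PySem.Str.strip w) ++ " "))) ≠ []
              ∧ ¬ ((tn.map (fun g => ((PySem.Str.split? g ",").getD []).map
                    (fun w => " " ++ PySem.Str.lower (PySem.Str.strip w) ++ " "))).any
                  fun g => g.all fun w => ! PySem.Str.isIn w (PySem.Str.lower p)) then
            (st.1, PySem.Set.add st.2 p)
          else (st.1 ++ [p], PySem.Set.add st.2 p))
        = (fun (st : List String × PySem.Set String) p =>
            if PySem.Set.contains st.2 p then st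
            else if k p then (st.1 ++ [p], PySem.Set.add st.2 p)
            else (st.1, PySem.Set.add st.2 p)) := by
      funext st p
      by_cases hc : PySem.Set.contains st.2 p = true
      · rw [if_pos hc, if_pos hc]
      · rw [if_neg hc, if_neg hc]
        by_cases hm : incMatch tc p = true
        · have hnm : ¬ ¬ (((tc.map (fun g => ((PySem.Str.split? g ",").getD []).map PySem.Str.lower)).any
              fun g => g.all fun w => PySem.Str.isIn w (PySem.Str.lower p)) = true) := by
            rw [hany_inc p]; exact fun h => h hm
          rw [if_neg hnm]
          by_cases htn : tn = []
          · subst htn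
            rw [if_neg (fun h => h.1 rfl), if_pos (by simp [hk, hm])]
          · have htnm : tn.map (fun g => ((PySem.Str.split? g ",").getD []).map
                (fun w => " " ++ PySem.Str.lower (PySem.Str.strip w) ++ " ")) ≠ [] := by
              simpa [List.map_eq_nil_iff] using htn
            by_cases he : ((tn.map (fun g => ((PySem.Str.split? g ",").getD []).map
                  (fun w => " " ++ PySem.Str.lower (PySem.Str.strip w) ++ " "))).any
                fun g => g.all fun w => ! PySem.Str.isIn w (PySem.Str.lower p)) = true
            · have hek : excKeep tn p = true := by rw [← hany_exc p]; exact he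
              rw [if_neg (fun h => h.2 he), if_pos (by simp [hk, hm, htn, hek])]
            · have hek : excKeep tn p = false := by
                rw [← hany_exc p]; exact eq_false_of_ne_true he
              rw [if_pos ⟨htnm, he⟩, if_neg (by simp [hk, hm, htn, hek])]
        · have hnm : ¬ (((tc.map (fun g => ((PySem.Str.split? g ",").getD []).map PySem.Str.lower)).any
              fun g => g.all fun w => PySem.Str.isIn w (PySem.Str.lower p)) = true) := by
            rw [hany_inc p]; exact hm
          rw [if_pos hnm, if_neg (by simp [hk, hm])]
    rw [hstep, fold_inc]
    simp only [List.nil_append]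
    rw [dedupAvoid_eq]
    have hfe : (PySem.Set.ofList paras).filter (fun y => ! PySem.Set.contains PySem.Set.empty y)
        = PySem.Set.ofList paras := by
      simp [PySem.Set.contains, PySem.Set.empty]
    rw [hfe]
    unfold canon
    simp only [ne_eq, htc, not_false_iff, if_true]
    by_cases htn : tn = []
    · subst htn
      simp only [not_true_eq_false, if_false]
      have hs := sorted_S2 paras
        (PySem.Set.ofList ((paras.filter (incMatch tc)).map (fun p => ((ifx paras p : Int), p))))
        (incMatch tc) ?_ (PySem.Set.nodup_ofList _)
      · rw [hs]
        have hkk : k = incMatch tc := by funext p; simp [hk]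
        rw [hkk]
        rw [List.map_map]
        simp [Function.comp_def]
      · intro x
        simp only [PySem.Set.mem_ofList, List.mem_map, List.mem_filter]
        constructor
        · rintro ⟨p, ⟨hp, hq⟩, rfl⟩; exact ⟨p, ⟨hp, hq⟩, rfl⟩
        · rintro ⟨p, ⟨hp, hq⟩, rfl⟩; exact ⟨p, ⟨hp, hq⟩, rfl⟩
    · simp only [htn, not_false_iff, if_true]
      have hs := sorted_S2 paras
        (PySem.Set.ofList
          (((PySem.Set.ofList ((paras.filter (incMatch tc)).map (fun p => ((ifx paras p : Int), p)))) :
              List (Int × String)).filter (fun t => excKeep tn t.2)))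
        (fun p => incMatch tc p && excKeep tn p) ?_ (PySem.Set.nodup_ofList _)
      · rw [hs]
        have hkk : k = (fun p => incMatch tc p && excKeep tn p) := by
          funext p; simp [hk, htn]
        rw [hkk, List.map_map]
        simp [Function.comp_def]
      · intro x
        simp only [PySem.Set.mem_ofList, List.mem_filter, List.mem_map, Bool.and_eq_true]
        constructor
        · rintro ⟨⟨p, ⟨hp, hq⟩, rfl⟩, he⟩; exact ⟨p, ⟨hp, hq, he⟩, rfl⟩
        · rintro ⟨p, ⟨hp, hq, he⟩, rfl⟩; exact ⟨⟨p, ⟨hp, hq⟩, rfl⟩, he⟩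

-- ===== VERDICT (by name: the statement is the Claim_ definition above) =====
theorem get_raw_text_by_topic_spec : Claim_equal_get_raw_text_by_topic := by
  intro topics raw_text _ _
  show get_raw_text_by_topic topics raw_text = get_raw_text_by_topic_alt topics raw_text
  exact (a_eq_canon ((PySem.Str.split? raw_text "\n").getD []) (topics.getD 0 []) (topics.getD 1 [])).trans
    (b_eq_canon ((PySem.Str.split? raw_text "\n").getD []) (topics.getD 0 []) (topics.getD 1 [])).symm
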